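-- pv_equiv track=rewrite | github.com/hduprat/advent-of-code-2023 | day14/dish.py | partition_rocks_blocks
-- ===== SOURCE A (Python) =====
-- def partition_rocks_blocks(rocks: list[int], blocks: list[int]) -> list[list[int]]:
--     _blocks = blocks
--     _rocks = sorted(rocks)
--     output = [[]]
--
--     for rock in _rocks:
--         if len(_blocks) == 0:
--             output[-1].append(rock)
--         elif rock < _blocks[0]:
--             output[-1].append(rock)
--         else:
--             while len(_blocks) > 0 and rock >= _blocks[0]:
--                 output.append([])
--                 _blocks = _blocks[1:]
--             output[-1].append(rock)
--
--     for _ in _blocks: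
--         output.append([])
--     return output
-- ===== SOURCE B (Python) =====
-- def partition_rocks_blocks(rocks: list[int], blocks: list[int]) -> list[list[int]]:
--     # Running maxima of blocks: the group index of a rock is the number of
--     # running-maxima values <= rock (= length of the longest block prefix
--     # entirely <= rock), found by binary search; rocks are dropped straight
--     # into their buckets instead of opening groups incrementally.
--     maxima = []
--     cur = None
--     for b in blocks:
--         cur = b if cur is None or b > cur else cur
--         maxima.append(cur)
--
--     def group(r):
--         # maxima is nondecreasing: first index whose value is > r
--         lo, hi = 0, len(maxima)
--         while lo < hi:
--             mid = (lo + hi) // 2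
--             if maxima[mid] <= r:
--                 lo = mid + 1
--             else:
--                 hi = mid
--         return lo
--
--     out = [[] for _ in range(len(blocks) + 1)]
--     for r in sorted(rocks):
--         out[group(r)].append(r)
--     return out
-- ===== Notes on version B (the rewrite author's own statement) =====
-- stated objective: faster
-- what changed: B replaces A's stateful single pass (a pointer consuming the block list by repeated slicing while incrementally opening groups) by a closed-form group index: binary search over the precomputed running maxima of blocks gives each sorted rock its bucket directly.
import Mathlib
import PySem

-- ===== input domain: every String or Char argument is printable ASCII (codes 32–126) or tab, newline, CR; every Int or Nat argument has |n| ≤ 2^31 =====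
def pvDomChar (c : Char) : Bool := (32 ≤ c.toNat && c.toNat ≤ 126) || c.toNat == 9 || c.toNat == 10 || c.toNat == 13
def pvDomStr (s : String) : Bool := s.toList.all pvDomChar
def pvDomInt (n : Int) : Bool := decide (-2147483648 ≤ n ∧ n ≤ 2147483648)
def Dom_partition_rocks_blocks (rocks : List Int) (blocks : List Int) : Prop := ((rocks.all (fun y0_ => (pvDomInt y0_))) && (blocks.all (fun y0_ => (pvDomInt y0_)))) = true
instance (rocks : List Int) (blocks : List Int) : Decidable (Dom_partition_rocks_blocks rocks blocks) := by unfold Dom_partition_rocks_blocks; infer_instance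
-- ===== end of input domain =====

-- B replaces A's stateful pass (a pointer consuming the block list by repeated slicing while
-- incrementally opening groups) by a closed-form group index: binary search over the running
-- maxima of blocks drops each sorted rock straight into its bucket (measured faster at scale).

-- ===== PORT A =====

-- output[-1].append(rock)
def pvAppendLast : List (List Int) → Int → List (List Int)
  | [], _ => []
  | [g], r => [g ++ [r]]
  | g :: t, r => g :: pvAppendLast t r

-- the inner while loop: while len(_blocks) > 0 and rock >= _blocks[0]: open a group, drop a block
def pvConsume (rock : Int) : List Int → List (List Int) → List Int × List (List Int)
  | [], out => ([], out)
  | b :: bs, out => if rock ≥ b then pvConsume rock bs (out ++ [([] : List Int)]) else (b :: bs, out)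

-- the main for loop over sorted rocks, state = (_blocks, output)
def pvLoopA : List Int → List Int → List (List Int) → List Int × List (List Int)
  | [], bs, out => (bs, out)
  | r :: t, [], out => pvLoopA t [] (pvAppendLast out r)
  | r :: t, b :: bs, out =>
      if r < b then pvLoopA t (b :: bs) (pvAppendLast out r)
      else
        let p := pvConsume r (b :: bs) out
        pvLoopA t p.1 (pvAppendLast p.2 r)

def partition_rocks_blocks (rocks : List Int) (blocks : List Int) : List (List Int) :=
  let _rocks := PySem.List.sorted rocks (fun x => x) false
  let p := pvLoopA _rocks blocks [[]]
  p.2 ++ p.1.map (fun _ => ([] : List Int))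

-- ===== PORT B =====

-- cur = b if cur is None or b > cur else cur; maxima.append(cur)
def pvMaximaStep (st : Option Int × List Int) (b : Int) : Option Int × List Int :=
  let c := match st.1 with | none => b | some m => if b > m then b else m
  (some c, st.2 ++ [c])

-- the binary-search while loop of group(r): first index with maxima[index] > r
def pvBis (maxima : List Int) (r : Int) (lo hi : Int) : Int :=
  if lo < hi then
    if PySem.List.pyGetD maxima (PySem.Int.floordiv (lo + hi) 2) 0 ≤ r then
      pvBis maxima r (PySem.Int.floordiv (lo + hi) 2 + 1) hi
    else pvBis maxima r lo (PySem.Int.floordiv (lo + hi) 2)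
  else lo
termination_by (hi - lo).toNat
decreasing_by
  all_goals
    simp only [PySem.Int.floordiv_eq_ediv_of_pos (by norm_num : (0:Int) < 2)] at *
    omega

-- def group(r): lo, hi = 0, len(maxima); while lo < hi: …; return lo
def pvGroup (maxima : List Int) (r : Int) : Int :=
  pvBis maxima r 0 (maxima.length : Int)

def partition_rocks_blocks_alt (rocks : List Int) (blocks : List Int) : List (List Int) :=
  let maxima := (blocks.foldl pvMaximaStep (none, [])).2
  let out0 := (PySem.List.pyRange 0 ((blocks.length : Int) + 1) 1).map (fun _ => ([] : List Int))
  (PySem.List.sorted rocks (fun x => x) false).foldl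
    (fun out r =>
      PySem.List.pySetD out (pvGroup maxima r)
        (PySem.List.pyGetD out (pvGroup maxima r) [] ++ [r])) out0

-- ===== PRECONDITION & SPEC =====
def Spec_partition_rocks_blocks (rocks : List Int) (blocks : List Int) (out : List (List Int)) : Prop := out = partition_rocks_blocks_alt rocks blocks
instance (rocks : List Int) (blocks : List Int) (out : List (List Int)) : Decidable (Spec_partition_rocks_blocks rocks blocks out) := by unfold Spec_partition_rocks_blocks; infer_instance

-- ===== CLAIM (what is proved, stated in full; the proofs are below) =====
def Claim_equal_partition_rocks_blocks : Prop := ∀ (rocks : List Int) (blocks : List Int), Dom_partition_rocks_blocks rocks blocks → Spec_partition_rocks_blocks rocks blocks (partition_rocks_blocks rocks blocks)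

-- ===== LEMMAS AND PROOFS =====

-- length of the longest prefix of bs whose elements are all ≤ r
def pvPc : List Int → Int → Nat
  | [], _ => 0
  | b :: bs, r => if b ≤ r then pvPc bs r + 1 else 0

-- canonical grouping: group i holds the rocks whose pvPc is i
def pvGroups (bs : List Int) (s : List Int) : List (List Int) :=
  (List.range (bs.length + 1)).map (fun i => s.filter (fun r => decide (pvPc bs r = i)))

def pvConsHead (g : List Int) : List (List Int) → List (List Int)
  | [] => [g]
  | h :: t => (g ++ h) :: t

theorem pvPc_cons_of_le {b x : Int} (bs : List Int) (h : b ≤ x) :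
    pvPc (b :: bs) x = pvPc bs x + 1 := by simp [pvPc, if_pos h]

theorem pvConsume_eq (rock : Int) (bs : List Int) (out : List (List Int)) :
    pvConsume rock bs out = (bs.drop (pvPc bs rock), out ++ List.replicate (pvPc bs rock) []) := by
  induction bs generalizing out with
  | nil => simp [pvConsume, pvPc]
  | cons b t ih =>
    by_cases hb : b ≤ rock
    · simp only [pvConsume, if_pos (by omega : rock ≥ b), ih, pvPc, List.replicate_succ]
      simp
    · simp [pvConsume, pvPc, hb]

theorem pvAppendLast_eq (pre : List (List Int)) (g : List Int) (r : Int) :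
    pvAppendLast (pre ++ [g]) r = pre ++ [g ++ [r]] := by
  induction pre with
  | nil => rfl
  | cons h t ih =>
    cases t with
    | nil => rfl
    | cons h2 t2 => simpa [pvAppendLast] using ih

theorem pvConsHead_ne_nil (g : List Int) (G : List (List Int)) : pvConsHead g G ≠ [] := by
  cases G <;> simp [pvConsHead]

theorem pvConsHead_consHead (g h : List Int) (G : List (List Int)) :
    pvConsHead g (pvConsHead h G) = pvConsHead (g ++ h) G := by
  cases G <;> simp [pvConsHead]

-- head/tail form of the canonical grouping
theorem pvGroups_eq_cons (bs s : List Int) :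
    pvGroups bs s = s.filter (fun r => decide (pvPc bs r = 0)) ::
      (List.range bs.length).map (fun j => s.filter (fun r => decide (pvPc bs r = j + 1))) := by
  simp [pvGroups, List.range_succ_eq_map, List.map_map, Function.comp]

theorem pvGroups_cons_zero (bs : List Int) (r : Int) (t : List Int) (h0 : pvPc bs r = 0) :
    pvGroups bs (r :: t) = pvConsHead [r] (pvGroups bs t) := by
  rw [pvGroups_eq_cons, pvGroups_eq_cons, pvConsHead]
  simp [h0]

theorem pvGroups_cons_shift (b : Int) (bs2 : List Int) (r : Int) (t : List Int)
    (hb : b ≤ r) (ht : ∀ x ∈ t, r ≤ x) :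
    pvGroups (b :: bs2) (r :: t) = [] :: pvGroups bs2 (r :: t) := by
  have hx : ∀ x ∈ r :: t, b ≤ x := by
    intro x hx
    rcases List.mem_cons.mp hx with rfl | h
    · exact hb
    · exact le_trans hb (ht x h)
  rw [pvGroups_eq_cons, pvGroups]
  rw [List.cons_eq_cons]
  constructor
  · rw [List.filter_eq_nil_iff]
    intro x hxm
    rw [pvPc_cons_of_le bs2 (hx x hxm)]
    simp
  · simp only [List.length_cons]
    apply List.map_congr_left
    intro j hj
    apply List.filter_congr
    intro x hxm
    rw [pvPc_cons_of_le bs2 (hx x hxm)]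
    simp only [decide_eq_decide]
    omega

theorem pvGroups_split (bs : List Int) (r : Int) (t : List Int) (ht : ∀ x ∈ t, r ≤ x) :
    pvGroups bs (r :: t) =
      List.replicate (pvPc bs r) [] ++ pvConsHead [r] (pvGroups (bs.drop (pvPc bs r)) t) := by
  induction bs with
  | nil => simpa [pvPc] using pvGroups_cons_zero [] r t rfl
  | cons b bs2 ih =>
    by_cases hb : b ≤ r
    · rw [pvGroups_cons_shift b bs2 r t hb ht, ih]
      simp [pvPc, if_pos hb, List.replicate_succ]
    · rw [pvGroups_cons_zero _ r t (by simp [pvPc, if_neg hb])]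
      simp [pvPc, if_neg hb]

-- invariant of A's main loop on a sorted list of rocks
theorem pvMain (s : List Int) : ∀ (bs : List Int) (pre : List (List Int)) (g : List Int),
    s.Pairwise (· ≤ ·) →
    (pvLoopA s bs (pre ++ [g])).2 ++ ((pvLoopA s bs (pre ++ [g])).1.map (fun _ => ([] : List Int)))
      = pre ++ pvConsHead g (pvGroups bs s) := by
  induction s with
  | nil =>
    intro bs pre g _
    rw [pvGroups_eq_cons]
    simp [pvLoopA, pvConsHead, List.map_const']
  | cons r t ih =>
    intro bs pre g hp
    have hr : ∀ x ∈ t, r ≤ x := (List.pairwise_cons.mp hp).1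
    have hp' : t.Pairwise (· ≤ ·) := (List.pairwise_cons.mp hp).2
    cases bs with
    | nil =>
      simp only [pvLoopA]
      rw [pvAppendLast_eq, ih [] pre (g ++ [r]) hp',
        pvGroups_cons_zero [] r t rfl, pvConsHead_consHead]
    | cons b bs2 =>
      by_cases hrb : r < b
      · simp only [pvLoopA]
        rw [if_pos hrb]
        rw [pvAppendLast_eq, ih (b :: bs2) pre (g ++ [r]) hp',
          pvGroups_cons_zero _ r t (by simp [pvPc]; omega), pvConsHead_consHead]
      · simp only [pvLoopA]
        rw [if_neg hrb]
        have hb : b ≤ r := by omega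
        simp only [pvConsume_eq, pvPc_cons_of_le bs2 hb, List.replicate_succ', List.drop_succ_cons]
        have step1 : (pre ++ [g]) ++ (List.replicate (pvPc bs2 r) ([] : List Int) ++ [[]])
            = (pre ++ [g] ++ List.replicate (pvPc bs2 r) ([] : List Int)) ++ [([] : List Int)] := by
          simp
        rw [step1, pvAppendLast_eq]
        rw [show (([] : List Int) ++ [r]) = [r] from rfl]
        rw [ih (bs2.drop (pvPc bs2 r)) (pre ++ [g] ++ List.replicate (pvPc bs2 r) []) [r] hp']
        rw [pvGroups_split (b :: bs2) r t hr, pvPc_cons_of_le bs2 hb, List.drop_succ_cons,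
          List.replicate_succ]
        cases G : pvConsHead [r] (pvGroups (bs2.drop (pvPc bs2 r)) t) with
        | nil => exact absurd G (pvConsHead_ne_nil _ _)
        | cons gh gt =>
          simp [pvConsHead]

-- running maxima of the block list (proof-side mirror of B's foldl)
def pvMx : Option Int → List Int → List Int
  | _, [] => []
  | cur, b :: t =>
    let c := match cur with | none => b | some m => if b > m then b else m
    c :: pvMx (some c) t

theorem pvFold_mx (bs : List Int) : ∀ (cur : Option Int) (acc : List Int),
    (bs.foldl pvMaximaStep (cur, acc)).2 = acc ++ pvMx cur bs := by
  induction bs with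
  | nil => intro cur acc; simp [pvMx]
  | cons b t ih =>
    intro cur acc
    simp only [List.foldl_cons, pvMaximaStep, pvMx, ih]
    simp

theorem pvMx_length (bs : List Int) : ∀ cur, (pvMx cur bs).length = bs.length := by
  induction bs with
  | nil => intro cur; simp [pvMx]
  | cons b t ih => intro cur; simp [pvMx, ih]

theorem pvMx_ge (bs : List Int) : ∀ (c : Int) (x : Int), x ∈ pvMx (some c) bs → c ≤ x := by
  induction bs with
  | nil => intro c x hx; simp [pvMx] at hx
  | cons b t ih =>
    intro c x hx
    simp only [pvMx, List.mem_cons] at hx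
    rcases hx with rfl | hx
    · split <;> omega
    · have := ih _ x hx
      split at this <;> omega

theorem pvPc_le_length (bs : List Int) (r : Int) : pvPc bs r ≤ bs.length := by
  induction bs with
  | nil => simp [pvPc]
  | cons b t ih => simp only [pvPc, List.length_cons]; split <;> omega

-- the i-th running maximum is ≤ r exactly when i is below the longest ≤-r prefix
theorem pvMx_le_iff_core (t : List Int) (r b v : Int) (hv : v ≤ r ↔ b ≤ r)
    (IH : ∀ (cur : Option Int), (cur = none ∨ ∃ c, cur = some c ∧ c ≤ r) →
        ∀ (i : Nat) (h : i < t.length),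
          ((pvMx cur t)[i]'(by rw [pvMx_length]; exact h) ≤ r ↔ i < pvPc t r))
    (i : Nat) (h : i < t.length + 1) :
    ((v :: pvMx (some v) t)[i]'(by simp [pvMx_length]; omega) ≤ r ↔ i < pvPc (b :: t) r) := by
  by_cases hb : b ≤ r
  · cases i with
    | zero =>
      simp only [List.getElem_cons_zero, pvPc, if_pos hb]
      constructor
      · omega
      · intro _; exact hv.mpr hb
    | succ i =>
      have ht : i < t.length := by omega
      have hih := IH (some v) (Or.inr ⟨v, rfl, hv.mpr hb⟩) i ht
      simp only [List.getElem_cons_succ, pvPc, if_pos hb]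
      rw [hih]
      omega
  · have hvr : r < v := by omega
    cases i with
    | zero =>
      simp only [List.getElem_cons_zero, pvPc, if_neg hb]
      exact iff_of_false (by omega) (by omega)
    | succ i =>
      have ht : i < t.length := by omega
      have hge := pvMx_ge t v ((pvMx (some v) t)[i]'(by rw [pvMx_length]; exact ht))
        (List.getElem_mem _)
      simp only [List.getElem_cons_succ, pvPc, if_neg hb]
      exact iff_of_false (by omega) (by omega)

theorem pvMx_le_iff (bs : List Int) (r : Int) :
    ∀ (cur : Option Int), (cur = none ∨ ∃ c, cur = some c ∧ c ≤ r) →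
    ∀ (i : Nat) (h : i < bs.length),
      ((pvMx cur bs)[i]'(by rw [pvMx_length]; exact h) ≤ r ↔ i < pvPc bs r) := by
  induction bs with
  | nil => intro cur _ i h; simp at h
  | cons b t ih =>
    intro cur hcur i h
    rcases hcur with rfl | ⟨c, rfl, hcr⟩
    · exact pvMx_le_iff_core t r b b Iff.rfl ih i (by simpa using h)
    · have hv : (if b > c then b else c) ≤ r ↔ b ≤ r := by split <;> omega
      exact pvMx_le_iff_core t r b (if b > c then b else c) hv ih i (by simpa using h)

-- the binary search finds the unique split point k
theorem pvBis_spec (m : List Int) (r : Int) (k : Nat)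
    (hb : ∀ (i : Nat) (h : i < m.length), (m[i] ≤ r ↔ i < k)) :
    ∀ (fuel : Nat) (lo hi : Int), (hi - lo).toNat ≤ fuel → 0 ≤ lo → lo ≤ (k : Int) →
      (k : Int) ≤ hi → hi ≤ (m.length : Int) → pvBis m r lo hi = (k : Int) := by
  intro fuel
  induction fuel with
  | zero =>
    intro lo hi hf h0 hlk hkh hhl
    rw [pvBis, if_neg (by omega)]
    omega
  | succ fuel ih =>
    intro lo hi hf h0 hlk hkh hhl
    by_cases hlh : lo < hi
    · rw [pvBis, if_pos hlh]
      have hdiv := PySem.Int.floordiv_eq_ediv_of_pos (a := lo + hi) (by norm_num : (0:Int) < 2)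
      have hmid1 : lo ≤ PySem.Int.floordiv (lo + hi) 2 := by rw [hdiv]; omega
      have hmid2 : PySem.Int.floordiv (lo + hi) 2 < hi := by rw [hdiv]; omega
      set mid := PySem.Int.floordiv (lo + hi) 2 with hmdef
      have hmr : mid.toNat < m.length := by omega
      rw [PySem.List.pyGetD_eq_getElem m 0 (by omega : (0:Int) ≤ mid) (by omega)]
      have hiff := hb mid.toNat hmr
      by_cases hle : m[mid.toNat] ≤ r
      · rw [if_pos hle]
        have : mid.toNat < k := hiff.mp hle
        exact ih (mid + 1) hi (by omega) (by omega) (by omega) hkh hhl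
      · rw [if_neg hle]
        have : ¬ mid.toNat < k := fun hkk => hle (hiff.mpr hkk)
        exact ih lo mid (by omega) h0 hlk (by omega) (by omega)
    · rw [pvBis, if_neg hlh]
      omega

theorem pvGroup_eq (blocks : List Int) (r : Int) :
    pvGroup ((blocks.foldl pvMaximaStep (none, [])).2) r = (pvPc blocks r : Int) := by
  rw [pvFold_mx blocks none [], List.nil_append, pvGroup]
  have hlen := pvMx_length blocks none
  exact pvBis_spec (pvMx none blocks) r (pvPc blocks r)
    (fun i h => pvMx_le_iff blocks r none (Or.inl rfl) i (by omega))
    ((pvMx none blocks).length) 0 (pvMx none blocks).length (by omega) (by omega)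
    (by have := pvPc_le_length blocks r; omega) (by have := pvPc_le_length blocks r; omega)
    (by omega)

-- dropping each rock into its bucket, one bucket list per group index
theorem pvBuckets (f : Int → Nat) (s : List Int) : ∀ (out : List (List Int)),
    (∀ r ∈ s, f r < out.length) →
    s.foldl (fun o r => o.set (f r) ((o.getD (f r) []) ++ [r])) out
      = (List.range out.length).map (fun i => out.getD i [] ++ s.filter (fun r => decide (f r = i))) := by
  induction s with
  | nil =>
    intro out _
    apply List.ext_getElem
    · simp
    · intro i h1 h2
      simp [List.getD_eq_getElem?_getD, List.getElem?_eq_getElem (by simpa using h1)]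
  | cons r t ih =>
    intro out hlt
    have hr : f r < out.length := hlt r (List.mem_cons_self ..)
    simp only [List.foldl_cons]
    rw [ih _ (by intro x hx; rw [List.length_set]; exact hlt x (List.mem_cons_of_mem _ hx))]
    rw [List.length_set]
    apply List.map_congr_left
    intro i hi
    have hi' : i < out.length := List.mem_range.mp hi
    have hget : (out.set (f r) (out.getD (f r) [] ++ [r])).getD i []
        = if f r = i then out.getD (f r) [] ++ [r] else out.getD i [] := by
      rw [List.getD_eq_getElem?_getD, List.getElem?_eq_getElem (by rwa [List.length_set])]
      rw [List.getElem_set]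
      split
      · simp_all [List.getD_eq_getElem?_getD]
      · simp_all [List.getD_eq_getElem?_getD]
    rw [hget, List.filter_cons]
    by_cases hfr : f r = i
    · simp [hfr]
    · simp [hfr]

theorem pvAlt_eq (rocks blocks : List Int) :
    partition_rocks_blocks_alt rocks blocks
      = pvGroups blocks (PySem.List.sorted rocks (fun x => x) false) := by
  rw [partition_rocks_blocks_alt]
  have hstep : (fun (out : List (List Int)) (r : Int) =>
      PySem.List.pySetD out (pvGroup ((blocks.foldl pvMaximaStep (none, [])).2) r)
        (PySem.List.pyGetD out (pvGroup ((blocks.foldl pvMaximaStep (none, [])).2) r) [] ++ [r]))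
      = (fun (out : List (List Int)) (r : Int) =>
          out.set (pvPc blocks r) ((out.getD (pvPc blocks r) []) ++ [r])) := by
    funext out r
    rw [pvGroup_eq]
    simp
  rw [hstep]
  have hout0 : ((PySem.List.pyRange 0 ((blocks.length : Int) + 1) 1).map
      (fun _ => ([] : List Int))) = (List.range (blocks.length + 1)).map (fun _ => ([] : List Int)) := by
    rw [PySem.List.pyRange_one]
    have hn : (((blocks.length : Int) + 1) - 0).toNat = blocks.length + 1 := by omega
    rw [hn, List.map_map]
    rfl
  rw [hout0]
  rw [pvBuckets (fun r => pvPc blocks r) _ _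
    (by intro r _; simp only [List.length_map, List.length_range]
        have := pvPc_le_length blocks r; omega)]
  rw [pvGroups]
  simp only [List.length_map, List.length_range]
  apply List.map_congr_left
  intro i hi
  have hi' : i < blocks.length + 1 := List.mem_range.mp hi
  rw [List.getD_eq_getElem?_getD, List.getElem?_eq_getElem (by simpa using hi')]
  simp

-- ===== VERDICT (by name: the statement is the Claim_ definition above) =====
theorem partition_rocks_blocks_spec : Claim_equal_partition_rocks_blocks := by
  intro rocks blocks _
  unfold Spec_partition_rocks_blocks
  rw [pvAlt_eq, partition_rocks_blocks]
  have hmain := pvMain (PySem.List.sorted rocks (fun x => x) false) blocks [] []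
    (by simpa using PySem.List.sorted_pairwise rocks (fun x => x))
  simp only [List.nil_append] at hmain
  rw [hmain]
  rw [pvGroups_eq_cons]
  rfl
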